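-- pv_equiv track=rewrite | github.com/PoojaModani/Mobile-testing-Robotframework- | .vscode/extensions/robocorp.robotframework-lsp-0.42.0/src/robotframework_ls/impl/semantic_tokens.py | _get_potential_library_names_from_keyword
-- ===== SOURCE A (Python) =====
-- from typing import List, Tuple, Iterator, Optional, Any
--
-- def _get_potential_library_names_from_keyword(keyword_name: str) -> Iterator[str]:
--     name_length = -1
--     while True:
--         name_length = keyword_name.find(".", name_length + 1)
--         if name_length == -1:
--             break
--         library_name = keyword_name[:name_length].lower()
--         yield library_name
-- ===== SOURCE B (Python) =====
-- def _get_potential_library_names_from_keyword(keyword_name: str):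
--     parts = keyword_name.split(".")
--     acc = parts[0]
--     for part in parts[1:]:
--         yield acc.lower()
--         acc += "." + part
-- ===== Notes on version B (the rewrite author's own statement) =====
-- stated objective: simpler
-- what changed: Replaces the repeated str.find scan over the whole string with a single split on the dot separator followed by a running-prefix accumulation over the segments, yielding one lowercased prefix per dot.
import Mathlib
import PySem

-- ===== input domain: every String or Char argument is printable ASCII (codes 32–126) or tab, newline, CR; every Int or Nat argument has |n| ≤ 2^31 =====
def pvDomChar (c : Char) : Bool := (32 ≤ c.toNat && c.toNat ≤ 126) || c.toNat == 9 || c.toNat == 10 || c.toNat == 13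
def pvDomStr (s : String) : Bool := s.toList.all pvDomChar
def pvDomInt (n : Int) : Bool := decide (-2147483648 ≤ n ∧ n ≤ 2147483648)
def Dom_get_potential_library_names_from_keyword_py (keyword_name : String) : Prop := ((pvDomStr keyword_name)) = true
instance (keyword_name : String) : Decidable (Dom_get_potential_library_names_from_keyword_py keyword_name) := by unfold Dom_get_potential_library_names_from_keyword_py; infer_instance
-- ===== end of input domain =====

-- B replaces A's repeated str.find scanning with one split('.') plus a running joined prefix (objective: simpler).

-- ===== PORT A =====
-- A's while-loop: repeatedly find the next '.', yield the lowercased prefix before it.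
-- fuel is only a totality guard: each iteration strictly advances the search start,
-- so s.toList.length + 1 iterations always suffice.
def pvALoop (s : String) (n : Int) : Nat → List String
  | 0 => []
  | fuel + 1 =>
    let m := PySem.Str.findFrom s "." (n + 1)
    if m = -1 then []
    else PySem.Str.lower (PySem.Str.slice s none (some m)) :: pvALoop s m fuel

def get_potential_library_names_from_keyword_py (keyword_name : String) : List String :=
  pvALoop keyword_name (-1) (keyword_name.toList.length + 1)

-- ===== PORT B =====
-- B: parts = keyword_name.split('.'); acc = parts[0]; for each later part yield acc.lower(), acc += '.' + part.
def pvBLoop (acc : String) : List String → List String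
  | [] => []
  | p :: ps => PySem.Str.lower acc :: pvBLoop (acc ++ "." ++ p) ps

def get_potential_library_names_from_keyword_py_alt (keyword_name : String) : List String :=
  match PySem.Str.split? keyword_name "." with
  | none => []        -- unreachable: the separator "." is nonempty
  | some [] => []     -- unreachable: str.split never returns an empty list
  | some (p :: ps) => pvBLoop p ps

-- ===== PRECONDITION & SPEC =====
def Spec_get_potential_library_names_from_keyword_py (keyword_name : String) (out : List String) : Prop := out = get_potential_library_names_from_keyword_py_alt keyword_name
instance (keyword_name : String) (out : List String) : Decidable (Spec_get_potential_library_names_from_keyword_py keyword_name out) := by unfold Spec_get_potential_library_names_from_keyword_py; infer_instance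

-- ===== CLAIM (what is proved, stated in full; the proofs are below) =====
def Claim_equal_get_potential_library_names_from_keyword_py : Prop := ∀ (keyword_name : String), Dom_get_potential_library_names_from_keyword_py keyword_name → Spec_get_potential_library_names_from_keyword_py keyword_name (get_potential_library_names_from_keyword_py keyword_name)

-- ===== LEMMAS AND PROOFS =====

-- Common reference: walk the characters, at each '.' emit the lowercased prefix read so far.
def pvCore (pre rest : List Char) : List String :=
  match rest with
  | [] => []
  | c :: r =>
    if c = '.' then String.ofList (PySem.Chars.lower pre) :: pvCore (pre ++ [c]) r
    else pvCore (pre ++ [c]) r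

lemma pvCore_no_dot (pre : List Char) : ∀ rest, '.' ∉ rest → pvCore pre rest = [] := by
  intro rest
  induction rest generalizing pre with
  | nil => intro _; rfl
  | cons c r ih =>
    intro h
    simp only [List.mem_cons, not_or] at h
    simp [pvCore, Ne.symm h.1, ih _ h.2]

lemma pvCore_split (r1 : List Char) : ∀ (pre r2 : List Char), '.' ∉ r1 →
    pvCore pre (r1 ++ '.' :: r2)
      = String.ofList (PySem.Chars.lower (pre ++ r1)) :: pvCore (pre ++ r1 ++ ['.']) r2 := by
  induction r1 with
  | nil => intro pre r2 _; simp [pvCore]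
  | cons c r ih =>
    intro pre r2 h
    simp only [List.mem_cons, not_or] at h
    simp only [List.cons_append, pvCore, if_neg (Ne.symm h.1)]
    rw [ih _ _ h.2]
    simp

-- ===== A-side: the find-loop equals pvCore =====

lemma pvALoop_eq (s : String) : ∀ (fuel k : Nat), k ≤ s.toList.length →
    s.toList.length - k < fuel →
    pvALoop s ((k : Int) - 1) fuel = pvCore (s.toList.take k) (s.toList.drop k) := by
  intro fuel
  induction fuel with
  | zero => intro k _ h; omega
  | succ fuel ih =>
    intro k hk hfuel
    have hdot : (".").toList = ['.'] := rfl
    simp only [pvALoop, sub_add_cancel, PySem.Str.findFrom_eq, hdot]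
    rw [PySem.Chars.findFrom_natCast _ _ k hk]
    by_cases hfind : PySem.Chars.find (s.toList.drop k) ['.'] = -1
    · rw [if_pos hfind]
      have hmem : '.' ∉ s.toList.drop k := fun hm =>
        (PySem.Chars.find_eq_neg_one_iff _ _).mp hfind ((List.singleton_infix_iff _ _).mpr hm)
      rw [pvCore_no_dot _ _ hmem]
      simp
    · rw [if_neg hfind]
      have hge : 0 ≤ PySem.Chars.find (s.toList.drop k) ['.'] := by
        have := PySem.Chars.neg_one_le_find (s.toList.drop k) ['.']
        omega
      obtain ⟨hpre, hmin⟩ := PySem.Chars.find_spec hge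
      set j := (PySem.Chars.find (s.toList.drop k) ['.']).toNat with hj
      have hjc : PySem.Chars.find (s.toList.drop k) ['.'] = (j : Int) := by omega
      obtain ⟨t, ht⟩ := hpre
      rw [List.drop_drop] at ht
      have ht' : s.toList.drop (k + j) = '.' :: t := ht.symm
      have hjk : k + j < s.toList.length := by
        have h1 : (s.toList.drop (k + j)).length = t.length + 1 := by rw [ht']; simp
        rw [List.length_drop] at h1
        omega
      have htt : t = s.toList.drop (k + j + 1) := by
        have h1 := congrArg (List.drop 1) ht'
        rw [List.drop_drop] at h1
        simpa using h1.symm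
      -- no '.' strictly before relative position j in the suffix
      have hnd : '.' ∉ (s.toList.drop k).take j := by
        intro hm
        obtain ⟨i, hi, he⟩ := List.getElem_of_mem hm
        have hil : i < j := lt_of_lt_of_le hi (by simpa using List.length_take_le j _)
        have hig : i < (s.toList.drop k).length :=
          lt_of_lt_of_le hi (by rw [List.length_take]; exact Nat.min_le_right _ _)
        refine hmin i hil ⟨(s.toList.drop k).drop (i + 1), ?_⟩
        rw [List.drop_eq_getElem_cons hig]
        have hei : (s.toList.drop k)[i] = '.' := by
          rw [← he]; simp [List.getElem_take]
        simp [hei]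
      have hm0 : ¬ ((k : Int) + PySem.Chars.find (s.toList.drop k) ['.'] = -1) := by
        rw [hjc]; omega
      rw [if_neg hm0]
      have hmn : (k : Int) + PySem.Chars.find (s.toList.drop k) ['.'] = ((k + j : Nat) : Int) := by
        rw [hjc]; push_cast; ring
      rw [hmn]
      -- head: the slice [:m].lower()
      have hslice : PySem.Str.lower (PySem.Str.slice s none (some ((k + j : Nat) : Int)))
          = String.ofList (PySem.Chars.lower (s.toList.take (k + j))) := by
        simp only [PySem.Str.lower, PySem.Str.slice, String.toList_ofList,
          PySem.Chars.slice_eq_listSlice]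
        rw [PySem.List.slice_to _ (Int.natCast_nonneg _), Int.toNat_natCast]
      rw [hslice]
      -- RHS: split the suffix at the first dot
      have hrest : s.toList.drop k
          = (s.toList.drop k).take j ++ '.' :: s.toList.drop (k + j + 1) := by
        conv_lhs => rw [← List.take_append_drop j (s.toList.drop k)]
        rw [List.drop_drop, ht', htt]
      rw [hrest, pvCore_split _ _ _ hnd]
      have htake : s.toList.take k ++ (s.toList.drop k).take j = s.toList.take (k + j) :=
        (List.take_add ..).symm
      have htake1 : s.toList.take (k + j) ++ ['.'] = s.toList.take (k + j + 1) := by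
        conv_rhs => rw [List.take_add]
        rw [ht']
        simp
      have hih := ih (k + j + 1) (by omega) (by omega)
      rw [show ((k + j + 1 : Nat) : Int) - 1 = ((k + j : Nat) : Int) by push_cast; ring] at hih
      rw [htake, htake1, hih]

-- ===== B-side: split('.') + running prefix equals pvCore =====

-- structural model of PySem.Chars.splitOn on the single-character separator '.'
def pvSplitAux (cur rest : List Char) : List (List Char) :=
  match rest with
  | [] => [cur.reverse]
  | c :: r => if c = '.' then cur.reverse :: pvSplitAux [] r else pvSplitAux (c :: cur) r

lemma pvSplitAux_ne_nil : ∀ rest cur, pvSplitAux cur rest ≠ [] := by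
  intro rest
  induction rest with
  | nil => intro cur; simp [pvSplitAux]
  | cons c r ih =>
    intro cur
    by_cases h : c = '.'
    · simp [pvSplitAux, h]
    · simpa [pvSplitAux, h] using ih (c :: cur)

lemma pvSplitOn_go_eq : ∀ (fuel : Nat) (l cur : List Char) (acc : List (List Char)),
    l.length ≤ fuel →
    PySem.Chars.splitOn.go ['.'] fuel l cur acc = acc.reverse ++ pvSplitAux cur l := by
  intro fuel
  induction fuel with
  | zero =>
    intro l cur acc h
    have : l = [] := List.length_eq_zero_iff.mp (by omega)
    subst this
    simp [PySem.Chars.splitOn.go, pvSplitAux]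
  | succ fuel ih =>
    intro l cur acc h
    cases l with
    | nil => simp [PySem.Chars.splitOn.go, pvSplitAux]
    | cons c r =>
      by_cases hc : c = '.'
      · subst hc
        have hp : ['.'].isPrefixOf ('.' :: r) = true := by simp [List.isPrefixOf]
        simp only [PySem.Chars.splitOn.go, hp, if_pos]
        rw [ih _ _ _ (by simpa using Nat.lt_succ_iff.mp (by simpa using h))]
        simp [pvSplitAux]
      · have hp : ['.'].isPrefixOf (c :: r) = false := by
          simp [List.isPrefixOf]; exact fun h' => absurd h'.symm hc
        simp only [PySem.Chars.splitOn.go, hp]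
        rw [if_neg (by simp)]
        rw [ih _ _ _ (by simpa using Nat.lt_succ_iff.mp (by simpa using h))]
        simp [pvSplitAux, hc]

lemma pvSplitOn_eq (l : List Char) : PySem.Chars.splitOn l ['.'] = pvSplitAux [] l := by
  unfold PySem.Chars.splitOn
  rw [pvSplitOn_go_eq _ _ _ _ (by omega)]
  simp

-- pvBLoop depends only on the underlying character lists
def pvBLoopC (acc : List Char) : List (List Char) → List String
  | [] => []
  | p :: ps => String.ofList (PySem.Chars.lower acc) :: pvBLoopC (acc ++ '.' :: p) ps

lemma pvBLoop_eq_chars : ∀ (ps : List (List Char)) (acc : String),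
    pvBLoop acc (ps.map String.ofList) = pvBLoopC acc.toList ps := by
  intro ps
  induction ps with
  | nil => intro acc; rfl
  | cons p ps ih =>
    intro acc
    simp only [List.map_cons, pvBLoop, pvBLoopC]
    rw [ih]
    have h2 : (acc ++ "." ++ String.ofList p).toList = acc.toList ++ '.' :: p := by
      simp [String.toList_append]
    rw [h2]
    rfl

lemma pvB1 : ∀ (rest cur pre : List Char),
    (match pvSplitAux cur rest with
     | [] => []
     | p :: ps => pvBLoopC (pre ++ p) ps) = pvCore (pre ++ cur.reverse) rest := by
  intro rest
  induction rest with
  | nil => intro cur pre; simp [pvSplitAux, pvBLoopC, pvCore]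
  | cons c r ih =>
    intro cur pre
    by_cases hc : c = '.'
    · subst hc
      obtain ⟨q, qs, hq⟩ := List.exists_cons_of_ne_nil (pvSplitAux_ne_nil r [])
      have hmatch : pvSplitAux cur ('.' :: r) = cur.reverse :: q :: qs := by
        simp [pvSplitAux, hq]
      rw [hmatch]
      have hih := ih [] (pre ++ cur.reverse ++ ['.'])
      rw [hq] at hih
      simp only [List.reverse_nil, List.append_nil] at hih
      show pvBLoopC (pre ++ cur.reverse) (q :: qs) = pvCore (pre ++ cur.reverse) ('.' :: r)
      simp only [pvBLoopC, pvCore, if_pos]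
      congr 1
      rw [← hih]
      congr 1
      simp
    · simp only [pvSplitAux, pvCore, if_neg hc]
      have := ih (c :: cur) pre
      rw [this]
      simp

-- ===== VERDICT (by name: the statement is the Claim_ definition above) =====
theorem get_potential_library_names_from_keyword_py_spec : Claim_equal_get_potential_library_names_from_keyword_py := by
  intro s _
  unfold Spec_get_potential_library_names_from_keyword_py
  unfold get_potential_library_names_from_keyword_py get_potential_library_names_from_keyword_py_alt
  -- A side
  have hA : pvALoop s (-1) (s.toList.length + 1) = pvCore [] s.toList := by
    have := pvALoop_eq s (s.toList.length + 1) 0 (by omega) (by omega)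
    simpa using this
  rw [hA]
  -- B side
  have hsep : (".").toList = ['.'] := rfl
  simp only [PySem.Str.split?, PySem.Chars.split?, hsep, List.isEmpty_cons]
  rw [if_neg (by simp)]
  rw [pvSplitOn_eq]
  obtain ⟨p, ps, hp⟩ := List.exists_cons_of_ne_nil (pvSplitAux_ne_nil s.toList [])
  rw [hp]
  simp only [Option.map_some, List.map_cons]
  have := pvB1 s.toList [] []
  rw [hp] at this
  simp only [List.nil_append, List.reverse_nil, List.append_nil] at this
  have hb : pvBLoop (String.ofList p) (List.map String.ofList ps) = pvBLoopC p ps := by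
    have := pvBLoop_eq_chars ps (String.ofList p)
    simpa using this
  rw [hb]
  simpa using this.symm
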